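-- pv_equiv track=rewrite | github.com/YangXiaoo/Lookoop | tool/毕设代码/script/sarsaOptimization.py | crossPoint
-- ===== SOURCE A (Python) =====
-- def crossPoint(points):
--     """交叉组合"""
--     def helper(points, res):
--         if not points:
--             return res
--         ret = []
--         for i in res:
--             for j in points[0]:
--                 ret.append(i + [j])
--
--         return helper(points[1:], ret)
--
--     res = [[v] for v in points[0]]
--
--     return helper(points[1:], res)
-- ===== SOURCE B (Python) =====
-- def crossPoint(points):
--     """交叉组合"""
--     res = [[v] for v in points[0]]
--     for lst in points[1:]:
--         res = [row + [x] for row in res for x in lst]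
--     return res
-- ===== Notes on version B (the rewrite author's own statement) =====
-- stated objective: simpler
-- what changed: Replaces the recursive helper threading an accumulator with a single iterative loop that rebuilds the result via a comprehension each round.
import Mathlib
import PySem

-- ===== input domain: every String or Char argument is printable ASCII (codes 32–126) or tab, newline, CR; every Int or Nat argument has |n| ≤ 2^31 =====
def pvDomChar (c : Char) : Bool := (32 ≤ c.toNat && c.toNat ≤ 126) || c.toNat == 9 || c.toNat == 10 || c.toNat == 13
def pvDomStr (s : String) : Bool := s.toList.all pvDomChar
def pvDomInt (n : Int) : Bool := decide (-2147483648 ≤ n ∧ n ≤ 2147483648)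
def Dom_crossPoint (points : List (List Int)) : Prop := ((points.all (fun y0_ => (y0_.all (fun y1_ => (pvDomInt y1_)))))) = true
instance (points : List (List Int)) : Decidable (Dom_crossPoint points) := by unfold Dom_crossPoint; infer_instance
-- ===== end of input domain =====

-- B replaces A's recursive accumulator-threading helper with one iterative loop; objective: simpler.

-- ===== PORT A =====
-- helper(points, res): nested for-loops appending i + [j], then recurse on points[1:]
def crossPointHelper : List (List Int) → List (List Int) → List (List Int)
  | [], res => res
  | p :: rest, res =>
      crossPointHelper rest
        (res.foldl (fun ret i => p.foldl (fun ret j => ret ++ [i ++ [j]]) ret) [])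

def crossPoint (points : List (List Int)) : List (List Int) :=
  match points with
  | [] => []        -- Python raises IndexError on points[0]; excluded by Pre_crossPoint
  | p :: rest => crossPointHelper rest (p.map (fun v => [v]))

-- ===== PORT B =====
def crossPoint_alt (points : List (List Int)) : List (List Int) :=
  match points with
  | [] => []        -- Python raises IndexError on points[0]; excluded by Pre_crossPoint
  | p :: rest =>
      rest.foldl (fun res lst => res.flatMap (fun row => lst.map (fun x => row ++ [x])))
        (p.map (fun v => [v]))

-- ===== PRECONDITION & SPEC =====
-- Pre_ excludes only the empty list, on which both Pythons raise IndexError at points[0].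
def Pre_crossPoint (points : List (List Int)) : Prop := points ≠ []
instance (points : List (List Int)) : Decidable (Pre_crossPoint points) := by unfold Pre_crossPoint; infer_instance
def pvWitness_crossPoint : List (List Int) := [[1, 2], [3]]
def Spec_crossPoint (points : List (List Int)) (out : List (List Int)) : Prop := out = crossPoint_alt points
instance (points : List (List Int)) (out : List (List Int)) : Decidable (Spec_crossPoint points out) := by unfold Spec_crossPoint; infer_instance

-- ===== CLAIM (what is proved, stated in full; the proofs are below) =====
def Claim_equal_crossPoint : Prop := ∀ (points : List (List Int)), Dom_crossPoint points → Pre_crossPoint points → Spec_crossPoint points (crossPoint points)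

-- ===== LEMMAS AND PROOFS =====
theorem crossPointHelper_eq_foldl (rest : List (List Int)) (res : List (List Int)) :
    crossPointHelper rest res =
      rest.foldl (fun res lst => res.flatMap (fun row => lst.map (fun x => row ++ [x]))) res := by
  induction rest generalizing res with
  | nil => rfl
  | cons p rest ih =>
      simp only [crossPointHelper, List.foldl_cons, ih]
      congr 1
      calc res.foldl (fun ret i => p.foldl (fun ret j => ret ++ [i ++ [j]]) ret) []
          = res.foldl (fun ret i => ret ++ p.map (fun j => i ++ [j])) [] := by
            apply PySem.List.foldl_congr_mem
            intro ret i _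
            exact PySem.List.foldl_append_singleton_eq_map _ _ _
        _ = res.flatMap (fun row => p.map (fun x => row ++ [x])) := by
            simpa using PySem.List.foldl_append_eq_flatMap (l := res) (acc := [])
              (g := fun i => p.map (fun j => i ++ [j]))

-- ===== VERDICT (by name: the statement is the Claim_ definition above) =====
theorem crossPoint_spec : Claim_equal_crossPoint := by
  intro points _ hpre
  unfold Spec_crossPoint crossPoint crossPoint_alt
  cases points with
  | nil => exact absurd rfl hpre
  | cons p rest => exact crossPointHelper_eq_foldl rest _
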